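-- pv_equiv track=rewrite | github.com/gustavobastian/exercises-DASSOPG | class-1/Ejercicios_extras/9/9_4.py | countingChar
-- ===== SOURCE A (Python) =====
-- def countingCharWord(word):
--     charW={}
--     for i in range(0,len(word)):
--         if(charW.get(word[i])==None):
--                 charW.update({str(word[i]):1})
--         else:
--             aux=charW.get(str(word[i]))
--             aux+=1
--             charW.update({str(word[i]):aux})
--     return charW
--
-- def countingCharPhrase(text):
--     textChar={}
--     for i in range(0,len(text)):
--         if(textChar.get(text[i])==None):
--                 textChar.update({str(text[i]):1})
--         else:
--             aux=textChar.get(str(text[i]))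
--             aux+=1
--             textChar.update({str(text[i]):aux})
--     return textChar
--
-- def countingChar(text):
--     textS= text.split(" ")
--     alldic=countingCharPhrase(text)
--     mydicW={}
--     mydicW2={}
--     for i in range(0,len(textS)):
--         if(mydicW.get(textS[i])==None):
--                 val=  countingCharWord(textS[i])
--                 mydicW.update({str(textS[i]):val})
--                 mydicW2.update({str(textS[i]):len(textS[i])})
--
--         else:
--             continue
--     return mydicW,mydicW2,alldic
-- ===== SOURCE B (Python) =====
-- def charcount(s):
--     return {c: s.count(c) for c in dict.fromkeys(s)}
--
-- def countingChar(text):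
--     words = list(dict.fromkeys(text.split(" ")))
--     mydicW = {w: charcount(w) for w in words}
--     mydicW2 = {w: len(w) for w in words}
--     alldic = charcount(text)
--     return mydicW, mydicW2, alldic
-- ===== Notes on version B (the rewrite author's own statement) =====
-- stated objective: faster
-- what changed: B replaces A's incremental dict-update loops (one full-text pass and one per word, mutating a count dict character by character) with a dedup-then-count formulation: words and characters are deduplicated once with dict.fromkeys and every dict is a comprehension whose values are closed-form str.count results, so no count dict is ever updated in place.
import Mathlib
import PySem

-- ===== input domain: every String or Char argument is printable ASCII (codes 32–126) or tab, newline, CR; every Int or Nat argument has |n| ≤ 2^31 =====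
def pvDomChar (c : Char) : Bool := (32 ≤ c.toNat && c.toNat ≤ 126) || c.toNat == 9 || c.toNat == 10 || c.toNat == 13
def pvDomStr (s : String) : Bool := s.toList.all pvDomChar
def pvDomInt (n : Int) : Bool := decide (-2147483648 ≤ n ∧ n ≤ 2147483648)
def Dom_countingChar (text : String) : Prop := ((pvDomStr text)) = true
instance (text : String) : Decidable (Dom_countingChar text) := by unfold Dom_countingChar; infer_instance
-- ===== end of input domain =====

-- B replaces A's incremental dict-update loops by a dedup-then-closed-form-count formulation
-- (dict comprehensions over dict.fromkeys with str.count values); measured faster in a timing run.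

-- ===== PORT A =====

-- str(word[i]) : the one-character string used as dict key
def pvKey (c : Char) : String := String.ofList [c]

-- the body of A's counting loops: if get(ch)==None then set 1 else set aux+1
def pvStepA (d : PySem.Dict String Int) (c : Char) : PySem.Dict String Int :=
  match d.get? (pvKey c) with
  | none => d.insert (pvKey c) 1
  | some aux => d.insert (pvKey c) (aux + 1)

def countingCharWord (word : String) : PySem.Dict String Int :=
  word.toList.foldl pvStepA PySem.Dict.empty

def countingCharPhrase (text : String) : PySem.Dict String Int :=
  text.toList.foldl pvStepA PySem.Dict.empty

-- the body of A's word loop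
def pvAStep (st : PySem.Dict String (PySem.Dict String Int) × PySem.Dict String Int)
    (w : String) : PySem.Dict String (PySem.Dict String Int) × PySem.Dict String Int :=
  match st.1.get? w with
  | none => (st.1.insert w (countingCharWord w), st.2.insert w (PySem.Str.len w))
  | some _ => st

def countingChar (text : String) :
    (List (String × List (String × Int))) × (List (String × Int)) × (List (String × Int)) :=
  let textS := (PySem.Str.split? text " ").getD []   -- text.split(" "); sep ≠ "" so split? is `some`
  let alldic := countingCharPhrase text
  let st := textS.foldl pvAStep (PySem.Dict.empty, PySem.Dict.empty)
  (st.1.items.map (fun p => (p.1, p.2.items)), st.2.items, alldic.items)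

-- ===== PORT B =====

-- Source B charcount: {c: s.count(c) for c in dict.fromkeys(s)}  (keys are the 1-char strings)
def pvCharCount (s : String) : PySem.Dict String Int :=
  PySem.Dict.ofList
    ((PySem.List.dedup (s.toList.map pvKey)).map (fun c => (c, (PySem.Str.count s c : Int))))

def countingChar_alt (text : String) :
    (List (String × List (String × Int))) × (List (String × Int)) × (List (String × Int)) :=
  let words := PySem.List.dedup ((PySem.Str.split? text " ").getD [])   -- list(dict.fromkeys(text.split(" ")))
  let mydicW := PySem.Dict.ofList (words.map (fun w => (w, pvCharCount w)))
  let mydicW2 := PySem.Dict.ofList (words.map (fun w => (w, (PySem.Str.len w : Int))))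
  let alldic := pvCharCount text
  (mydicW.items.map (fun p => (p.1, p.2.items)), mydicW2.items, alldic.items)

-- ===== PRECONDITION & SPEC =====
def Spec_countingChar (text : String) (out : (List (String × List (String × Int))) × (List (String × Int)) × (List (String × Int))) : Prop := out = countingChar_alt text
instance (text : String) (out : (List (String × List (String × Int))) × (List (String × Int)) × (List (String × Int))) : Decidable (Spec_countingChar text out) := by unfold Spec_countingChar; infer_instance

-- ===== CLAIM (what is proved, stated in full; the proofs are below) =====
def Claim_equal_countingChar : Prop := ∀ (text : String), Dom_countingChar text → Spec_countingChar text (countingChar text)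

-- ===== LEMMAS AND PROOFS =====

theorem pvKey_injective : Function.Injective pvKey := by
  intro a b h
  have h2 := congrArg String.toList h
  simpa [pvKey] using h2

theorem pvNodupFst {α ν : Type} (l : List α) (f : α → ν) (h : l.Nodup) :
    (l.map (Prod.fst ∘ fun c => (c, f c))).Nodup := by
  have he : (Prod.fst ∘ fun c => (c, f c)) = id := rfl
  rw [he, List.map_id]; exact h

-- a dict built from a list with distinct keys has exactly that items list
theorem pvItems_ofList {ν : Type} (l : List (String × ν)) (h : (l.map Prod.fst).Nodup) :
    (PySem.Dict.ofList l).items = l := by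
  show (PySem.Dict.update PySem.Dict.empty l).items = l
  unfold PySem.Dict.update
  have := PySem.Dict.items_foldl_insert_fresh l Prod.fst Prod.snd PySem.Dict.empty
    (fun a _ => PySem.Dict.contains_empty _) h
  simpa using this

-- str.count with a single-character needle counts that character
theorem pvCountGo (c : Char) (fuel : Nat) (l : List Char) (acc : Nat) (hf : l.length ≤ fuel) :
    PySem.Chars.count.go [c] fuel l acc = acc + l.count c := by
  induction fuel generalizing l acc with
  | zero =>
    cases l with
    | nil => simp [PySem.Chars.count.go]
    | cons a t => simp at hf
  | succ fuel ih =>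
    cases l with
    | nil => simp [PySem.Chars.count.go]
    | cons a t =>
      rw [PySem.Chars.count.go]
      by_cases hac : a = c
      · subst hac
        have hpre : List.isPrefixOf [a] (a :: t) = true := by simp [List.isPrefixOf]
        rw [if_pos hpre]
        simp only [List.length_cons, List.length_nil, Nat.zero_add, List.drop_succ_cons,
          List.drop_zero]
        rw [ih t (acc + 1) (by simp at hf; omega)]
        simp
        omega
      · have hpre : List.isPrefixOf [c] (a :: t) = false := by
          simp [List.isPrefixOf]; exact fun h => hac h.symm
        rw [if_neg (by simp [hpre])]
        rw [ih t acc (by simp at hf; omega)]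
        simp [hac]

theorem pvStrCount_key (s : String) (c : Char) :
    PySem.Str.count s (pvKey c) = s.toList.count c := by
  have hkey : (pvKey c).toList = [c] := by simp [pvKey]
  show PySem.Chars.count s.toList (pvKey c).toList = s.toList.count c
  rw [hkey]
  unfold PySem.Chars.count
  rw [if_neg (by simp)]
  simpa using pvCountGo c s.toList.length s.toList 0 le_rfl

-- A's counting step is "insert key (getD key 0 + 1)"
theorem pvStepA_eq (d : PySem.Dict String Int) (c : Char) :
    pvStepA d c = d.insert (pvKey c) (d.getD (pvKey c) 0 + 1) := by
  unfold pvStepA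
  cases h : d.get? (pvKey c) with
  | none => simp [PySem.Dict.getD_eq_get?_getD, h]
  | some aux => simp [PySem.Dict.getD_eq_get?_getD, h]

-- hence A's counting loop is collections.Counter of the 1-char-string keys
theorem pvFoldA_counter (cs : List Char) :
    cs.foldl pvStepA PySem.Dict.empty = PySem.Dict.counter (cs.map pvKey) := by
  rw [PySem.List.foldl_congr_mem _ _ (fun d c => d.insert (pvKey c) (d.getD (pvKey c) 0 + 1)) _
    (fun acc x _ => pvStepA_eq acc x)]
  rw [← PySem.Dict.foldl_insert_getD_add_one_eq_counter, List.foldl_map]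

-- A's incremental char-count dict IS B's dedup-then-count dict
theorem pvPhrase_eq (s : String) : countingCharPhrase s = pvCharCount s := by
  unfold countingCharPhrase pvCharCount
  rw [pvFoldA_counter]
  apply PySem.Dict.ext
  rw [PySem.Dict.items_counter,
    pvItems_ofList _ (by rw [List.map_map]; exact pvNodupFst _ _ (PySem.Set.nodup_ofList _))]
  rw [PySem.List.dedup_eq_ofList]
  apply List.map_congr_left
  intro k hk
  obtain ⟨c, hc, rfl⟩ := List.mem_map.mp ((PySem.Set.mem_ofList _ _).mp hk)
  rw [List.count_map_of_injective _ _ pvKey_injective, pvStrCount_key]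

theorem pvWord_eq (w : String) : countingCharWord w = pvCharCount w := pvPhrase_eq w

-- A's word loop from a seen-set S builds exactly the first-occurrence maps
theorem pvALoop (ws : List String) (S : List String) (hS : S.Nodup) :
    ws.foldl pvAStep
      (PySem.Dict.mk (S.map (fun w => (w, countingCharWord w))),
       PySem.Dict.mk (S.map (fun w => (w, (PySem.Str.len w : Int)))))
    = (PySem.Dict.mk ((PySem.Set.update S ws).map (fun w => (w, countingCharWord w))),
       PySem.Dict.mk ((PySem.Set.update S ws).map (fun w => (w, (PySem.Str.len w : Int))))) := by
  induction ws generalizing S with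
  | nil => simp [PySem.Set.update]
  | cons w t ih =>
    rw [List.foldl_cons, PySem.Set.update_cons]
    by_cases hw : w ∈ S
    · have hstep : pvAStep
          (PySem.Dict.mk (S.map (fun w => (w, countingCharWord w))),
           PySem.Dict.mk (S.map (fun w => (w, (PySem.Str.len w : Int))))) w
          = (PySem.Dict.mk (S.map (fun w => (w, countingCharWord w))),
             PySem.Dict.mk (S.map (fun w => (w, (PySem.Str.len w : Int))))) := by
        unfold pvAStep
        cases hget : (PySem.Dict.mk (S.map (fun w => (w, countingCharWord w)))).get? w with
        | none =>
          rw [PySem.Dict.get?_eq_none_iff_not_mem_keys] at hget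
          rw [PySem.Dict.keys_mk] at hget
          simp at hget
          exact absurd hw hget
        | some _ => rfl
      rw [hstep, PySem.Set.add_of_mem hw, ih S hS]
    · have hcont : ∀ (ν : Type) (f : String → ν),
          (PySem.Dict.mk (S.map (fun w => (w, f w)))).contains w = false := by
        intro ν f
        rw [PySem.Dict.contains_eq_decide_mem_keys, PySem.Dict.keys_mk]
        simpa using hw
      have hstep : pvAStep
          (PySem.Dict.mk (S.map (fun w => (w, countingCharWord w))),
           PySem.Dict.mk (S.map (fun w => (w, (PySem.Str.len w : Int))))) w
          = (PySem.Dict.mk ((S ++ [w]).map (fun w => (w, countingCharWord w))),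
             PySem.Dict.mk ((S ++ [w]).map (fun w => (w, (PySem.Str.len w : Int))))) := by
        unfold pvAStep
        cases hget : (PySem.Dict.mk (S.map (fun w => (w, countingCharWord w)))).get? w with
        | some v =>
          have hc := hcont (PySem.Dict String Int) countingCharWord
          rw [PySem.Dict.contains_eq_isSome_get?, hget] at hc
          simp at hc
        | none =>
          refine Prod.ext ?_ ?_ <;> apply PySem.Dict.ext <;>
            rw [PySem.Dict.items_insert_of_not_contains _ _ (hcont _ _)] <;>
            first
            | rfl
            | simp
      rw [hstep, PySem.Set.add_of_not_mem hw, ih (S ++ [w]) (by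
        simp [List.nodup_append, hS]
        exact fun a ha h => hw (h ▸ ha))]

theorem countingChar_eq (text : String) : countingChar text = countingChar_alt text := by
  simp only [countingChar, countingChar_alt]
  have hloop := pvALoop ((PySem.Str.split? text " ").getD []) [] List.nodup_nil
  have hempty : (PySem.Dict.empty : PySem.Dict String (PySem.Dict String Int)) = PySem.Dict.mk [] := rfl
  have hempty2 : (PySem.Dict.empty : PySem.Dict String Int) = PySem.Dict.mk [] := rfl
  rw [hempty, hempty2]
  rw [show (PySem.Dict.mk ([] : List (String × PySem.Dict String Int)),
      PySem.Dict.mk ([] : List (String × Int)))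
      = (PySem.Dict.mk (([] : List String).map (fun w => (w, countingCharWord w))),
         PySem.Dict.mk (([] : List String).map (fun w => (w, (PySem.Str.len w : Int))))) from rfl]
  rw [hloop]
  have hwords : PySem.Set.update ([] : List String) ((PySem.Str.split? text " ").getD [])
      = PySem.List.dedup ((PySem.Str.split? text " ").getD []) := by
    rw [PySem.Set.update_nil_left, PySem.List.dedup_eq_ofList]
  rw [hwords]
  have hnd : ((PySem.List.dedup ((PySem.Str.split? text " ").getD [])).map
      (fun w => (w, pvCharCount w)) |>.map Prod.fst).Nodup := by
    rw [List.map_map, PySem.List.dedup_eq_ofList]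
    exact pvNodupFst _ _ (PySem.Set.nodup_ofList _)
  have hnd2 : ((PySem.List.dedup ((PySem.Str.split? text " ").getD [])).map
      (fun w => (w, (PySem.Str.len w : Int))) |>.map Prod.fst).Nodup := by
    rw [List.map_map, PySem.List.dedup_eq_ofList]
    exact pvNodupFst _ _ (PySem.Set.nodup_ofList _)
  rw [pvItems_ofList _ hnd, pvItems_ofList _ hnd2]
  refine Prod.ext ?_ (Prod.ext ?_ ?_)
  · simp [List.map_map, pvWord_eq]
  · rfl
  · simp [pvPhrase_eq]

-- ===== VERDICT (by name: the statement is the Claim_ definition above) =====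
theorem countingChar_spec : Claim_equal_countingChar := by
  intro text _
  unfold Spec_countingChar
  exact countingChar_eq text
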